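-- pv_equiv track=rewrite | github.com/redsand/rev | rev/execution/quick_verify.py | _inject_double_dash
-- ===== SOURCE A (Python) =====
-- def _normalize_path_token(value: str) -> str:
--     return str(value).replace("\\", "/")
--
-- def _strip_test_paths(cmd_parts: list[str], test_paths: list[str]) -> list[str]:
--     test_set = {_normalize_path_token(path) for path in test_paths}
--     return [part for part in cmd_parts if _normalize_path_token(part) not in test_set]
--
-- def _inject_double_dash(cmd_parts: list[str], test_paths: list[str]) -> list[str]:
--     base = _strip_test_paths(cmd_parts, test_paths)
--     if "--" in base:
--         idx = base.index("--")
--         before = base[:idx + 1]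
--         test_set = {_normalize_path_token(path) for path in test_paths}
--         after = [part for part in base[idx + 1:] if _normalize_path_token(part) not in test_set]
--         return before + test_paths + after
--     return base + ["--"] + test_paths
-- ===== SOURCE B (Python) =====
-- def _inject_double_dash(cmd_parts: list[str], test_paths: list[str]) -> list[str]:
--     # single pass: filter, splice test_paths after the first surviving "--", flag-tracked
--     test_set = {p.replace("\\", "/") for p in test_paths}
--     out: list[str] = []
--     inserted = False
--     for part in cmd_parts:
--         if part.replace("\\", "/") in test_set:
--             continue
--         out.append(part)
--         if not inserted and part == "--":
--             out.extend(test_paths)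
--             inserted = True
--     if not inserted:
--         out.append("--")
--         out.extend(test_paths)
--     return out
-- ===== Notes on version B (the rewrite author's own statement) =====
-- stated objective: simpler
-- what changed: Replaced A's three traversals (strip pass, index+slice, re-filter of the tail) by one loop over cmd_parts that filters and splices test_paths after the first surviving '--' using an inserted flag, appending '--' and test_paths at the end if none survived.
import Mathlib
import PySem

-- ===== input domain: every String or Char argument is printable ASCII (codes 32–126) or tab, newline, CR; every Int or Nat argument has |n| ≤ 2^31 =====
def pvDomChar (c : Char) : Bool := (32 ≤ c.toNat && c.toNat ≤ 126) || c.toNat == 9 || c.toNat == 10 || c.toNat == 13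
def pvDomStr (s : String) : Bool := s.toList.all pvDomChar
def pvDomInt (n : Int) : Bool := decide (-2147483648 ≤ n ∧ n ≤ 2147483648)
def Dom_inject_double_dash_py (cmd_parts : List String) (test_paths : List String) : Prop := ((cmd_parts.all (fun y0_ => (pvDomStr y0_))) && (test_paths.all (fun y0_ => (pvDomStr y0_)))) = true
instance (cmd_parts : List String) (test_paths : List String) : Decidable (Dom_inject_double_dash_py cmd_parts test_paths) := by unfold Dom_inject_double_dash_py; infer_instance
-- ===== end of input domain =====

-- B merges A's three traversals (strip, index+slice, re-filter) into one flagged loop; objective: simpler.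

-- ===== PORT A =====
-- _normalize_path_token
def pvNorm (s : String) : String := PySem.Str.replace s "\\" "/"

-- _strip_test_paths
def pvStrip (cmd_parts : List String) (test_paths : List String) : List String :=
  let test_set : PySem.Set String := PySem.Set.ofList (test_paths.map pvNorm)
  cmd_parts.filter (fun part => !(PySem.Set.contains test_set (pvNorm part)))

def inject_double_dash_py (cmd_parts : List String) (test_paths : List String) : List String :=
  let base := pvStrip cmd_parts test_paths
  if base.contains "--" then
    let idx := (PySem.List.index? base "--").getD 0
    let before := PySem.List.slice base none (some ((idx : Int) + 1))
    let test_set : PySem.Set String := PySem.Set.ofList (test_paths.map pvNorm)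
    let after := (PySem.List.slice base (some ((idx : Int) + 1)) none).filter
      (fun part => !(PySem.Set.contains test_set (pvNorm part)))
    before ++ test_paths ++ after
  else base ++ ["--"] ++ test_paths

-- ===== PORT B =====
-- the single pass of Source B: state = (out, inserted), out kept as accumulator
def pvLoopB (test_paths : List String) (test_set : PySem.Set String) :
    List String → List String → Bool → List String
  | [], out, inserted => if inserted then out else (out ++ ["--"]) ++ test_paths
  | part :: rest, out, inserted =>
      if PySem.Set.contains test_set (pvNorm part) then
        pvLoopB test_paths test_set rest out inserted
      else if !inserted && part == "--" then
        pvLoopB test_paths test_set rest ((out ++ [part]) ++ test_paths) true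
      else
        pvLoopB test_paths test_set rest (out ++ [part]) inserted

def inject_double_dash_py_alt (cmd_parts : List String) (test_paths : List String) : List String :=
  let test_set : PySem.Set String := PySem.Set.ofList (test_paths.map pvNorm)
  pvLoopB test_paths test_set cmd_parts [] false

-- ===== PRECONDITION & SPEC =====
def Spec_inject_double_dash_py (cmd_parts : List String) (test_paths : List String) (out : List String) : Prop := out = inject_double_dash_py_alt cmd_parts test_paths
instance (cmd_parts : List String) (test_paths : List String) (out : List String) : Decidable (Spec_inject_double_dash_py cmd_parts test_paths out) := by unfold Spec_inject_double_dash_py; infer_instance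

-- ===== CLAIM (what is proved, stated in full; the proofs are below) =====
def Claim_equal_inject_double_dash_py : Prop := ∀ (cmd_parts : List String) (test_paths : List String), Dom_inject_double_dash_py cmd_parts test_paths → Spec_inject_double_dash_py cmd_parts test_paths (inject_double_dash_py cmd_parts test_paths)

-- ===== LEMMAS AND PROOFS =====

-- reference shape: inject into an already-stripped list
def pvG (test_paths : List String) : List String → List String
  | [] => "--" :: test_paths
  | p :: rest => if p == "--" then p :: (test_paths ++ rest) else p :: pvG test_paths rest

theorem pvLoopB_true (tp : List String) (ts : PySem.Set String) (l out : List String) :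
    pvLoopB tp ts l out true =
      out ++ l.filter (fun p => !(PySem.Set.contains ts (pvNorm p))) := by
  induction l generalizing out with
  | nil => simp [pvLoopB]
  | cons p rest ih =>
      by_cases hm : pvNorm p ∈ ts
      · simp [pvLoopB, hm, ih]
      · simp [pvLoopB, hm, ih]

theorem pvLoopB_false (tp : List String) (ts : PySem.Set String) (l out : List String) :
    pvLoopB tp ts l out false =
      out ++ pvG tp (l.filter (fun p => !(PySem.Set.contains ts (pvNorm p)))) := by
  induction l generalizing out with
  | nil => simp [pvLoopB, pvG]
  | cons p rest ih =>
      by_cases hm : pvNorm p ∈ ts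
      · simp [pvLoopB, hm, ih]
      · by_cases hd : p = "--"
        · subst hd
          simp [pvLoopB, hm, pvLoopB_true, pvG]
        · simp [pvLoopB, hm, hd, ih, pvG]

-- A's body on a list all of whose elements survive the filter equals pvG
theorem pvA_on_filtered (tp : List String) (ts : PySem.Set String) (base : List String)
    (h : ∀ p ∈ base, pvNorm p ∉ ts) :
    (if base.contains "--" then
        PySem.List.slice base none (some ((((PySem.List.index? base "--").getD 0) : Int) + 1))
          ++ tp ++
          (PySem.List.slice base (some ((((PySem.List.index? base "--").getD 0) : Int) + 1)) none).filter
            (fun part => !(PySem.Set.contains ts (pvNorm part)))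
      else base ++ ["--"] ++ tp) = pvG tp base := by
  induction base with
  | nil => simp [pvG]
  | cons p rest ih =>
      have hrest : ∀ q ∈ rest, pvNorm q ∉ ts := fun q hq => h q (by simp [hq])
      have hfil : rest.filter (fun part => !(PySem.Set.contains ts (pvNorm part))) = rest :=
        List.filter_eq_self.mpr (fun q hq => by simpa using hrest q hq)
      by_cases hd : p = "--"
      · subst hd
        have hidx : PySem.List.index? ("--" :: rest) "--" = some 0 :=
          PySem.List.index?_cons_self ..
        have h1 : ((0 : Nat) : Int) + 1 = ((1 : Nat) : Int) := by norm_num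
        rw [if_pos (by simp), hidx]
        simp only [Option.getD_some, h1, PySem.List.slice_to_natCast,
          PySem.List.slice_from_natCast, List.take_succ_cons, List.take_zero,
          List.drop_succ_cons, List.drop_zero, hfil]
        simp [pvG]
      · have hcons : ((p :: rest).contains "--") = rest.contains "--" := by
          simp [Ne.symm hd]
        by_cases hmem : rest.contains "--" = true
        · obtain ⟨k, hk⟩ : ∃ k, PySem.List.index? rest "--" = some k :=
            Option.isSome_iff_exists.mp
              ((PySem.List.index?_isSome_iff rest "--").mpr (by simpa using hmem))
          have hidx : PySem.List.index? (p :: rest) "--" = some (k + 1) := by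
            rw [PySem.List.index?_cons_of_ne rest hd, hk]; rfl
          have hA := ih hrest
          rw [if_pos hmem, hk] at hA
          simp only [Option.getD_some] at hA
          have hc1 : ((k : Int) + 1) = (((k + 1 : Nat)) : Int) := by push_cast; ring
          rw [hc1, PySem.List.slice_to_natCast, PySem.List.slice_from_natCast] at hA
          rw [if_pos (hcons.trans hmem), hidx]
          simp only [Option.getD_some]
          have hc2 : (((k + 1 : Nat) : Int) + 1) = (((k + 2 : Nat)) : Int) := by push_cast; ring
          rw [hc2, PySem.List.slice_to_natCast, PySem.List.slice_from_natCast]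
          have hg : pvG tp (p :: rest) = p :: pvG tp rest := by simp [pvG, hd]
          rw [hg, ← hA]
          simp
        · have hmem' : rest.contains "--" = false := by simpa using hmem
          rw [if_neg (by rw [hcons, hmem']; simp)]
          have hA := ih hrest
          rw [if_neg (by rw [hmem']; simp)] at hA
          have hg : pvG tp (p :: rest) = p :: pvG tp rest := by simp [pvG, hd]
          rw [hg, ← hA]
          simp

-- ===== VERDICT (by name: the statement is the Claim_ definition above) =====
theorem inject_double_dash_py_spec : Claim_equal_inject_double_dash_py := by
  intro cmd_parts test_paths _
  unfold Spec_inject_double_dash_py inject_double_dash_py inject_double_dash_py_alt pvStrip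
  rw [pvLoopB_false]
  set ts : PySem.Set String := PySem.Set.ofList (test_paths.map pvNorm) with hts
  have hmem : ∀ p ∈ cmd_parts.filter (fun part => !(PySem.Set.contains ts (pvNorm part))),
      pvNorm p ∉ ts := by
    intro p hp
    simpa using List.of_mem_filter hp
  simpa using pvA_on_filtered test_paths ts
    (cmd_parts.filter (fun part => !(PySem.Set.contains ts (pvNorm part)))) hmem
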